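-- pv_equiv track=rewrite | github.com/MiteshChaudhari18/OnionX | utils/validators.py | sanitize_text_input
-- ===== SOURCE A (Python) =====
-- def sanitize_text_input(text: str, max_length: int = 10000) -> str:
--     """Sanitize text input"""
--     if not isinstance(text, str):
--         return ""
--
--     # Strip whitespace
--     text = text.strip()
--
--     # Limit length
--     if len(text) > max_length:
--         text = text[:max_length]
--
--     # Remove potentially dangerous characters for file operations
--     dangerous_chars = ['<', '>', ':', '"', '|', '?', '*', '\x00']
--     for char in dangerous_chars:
--         text = text.replace(char, '')
--
--     return text
-- ===== SOURCE B (Python) =====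
-- def sanitize_text_input(text: str, max_length: int = 10000) -> str:
--     """Sanitize text input (explicit char-list pipeline: manual strip loops,
--     truncation, then one accumulating filter pass instead of 8 replace scans)."""
--     if not isinstance(text, str):
--         return ""
--
--     chars = list(text)
--
--     # strip: peel whitespace off the front, then off the back
--     while chars and chars[0].isspace():
--         del chars[0]
--     while chars and chars[-1].isspace():
--         del chars[-1]
--
--     # limit length (pre-removal, as in the original)
--     if len(chars) > max_length:
--         chars = chars[:max_length]
--
--     bad = '<>:"|?*\x00'
--     out = []
--     for ch in chars:
--         if ch not in bad:
--             out.append(ch)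
--     return ''.join(out)
-- ===== Notes on version B (the rewrite author's own statement) =====
-- stated objective: alternative
-- what changed: A's str.strip plus eight sequential str.replace rescans are replaced by an explicit character-list pipeline: two peeling loops that strip whitespace from each end, truncation, and a single accumulating filter pass over the characters.
import Mathlib
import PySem

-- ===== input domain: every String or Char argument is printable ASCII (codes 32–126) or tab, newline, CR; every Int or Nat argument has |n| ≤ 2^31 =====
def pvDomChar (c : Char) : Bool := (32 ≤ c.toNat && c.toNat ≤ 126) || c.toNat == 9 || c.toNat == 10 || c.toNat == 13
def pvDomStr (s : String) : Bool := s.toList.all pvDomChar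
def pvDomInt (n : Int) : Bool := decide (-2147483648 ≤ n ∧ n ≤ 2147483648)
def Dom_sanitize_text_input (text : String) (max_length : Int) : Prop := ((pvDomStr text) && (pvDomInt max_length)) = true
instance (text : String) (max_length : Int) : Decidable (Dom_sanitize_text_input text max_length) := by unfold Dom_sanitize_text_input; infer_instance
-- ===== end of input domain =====

-- B replaces A's str.strip and eight sequential str.replace passes by an explicit
-- char-list pipeline (peel whitespace off each end, truncate, one accumulating
-- filter pass); same return value on the domain.


-- ===== PORT A =====
-- dangerous_chars = ['<', '>', ':', '"', '|', '?', '*', '\x00']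
def dangerous_chars : List Char := ['<', '>', ':', '"', '|', '?', '*', '\x00']

def sanitize_text_input (text : String) (max_length : Int) : String :=
  -- text = text.strip()
  let t1 := PySem.Str.strip text
  -- if len(text) > max_length: text = text[:max_length]
  let t2 := if PySem.Str.len t1 > max_length then PySem.Str.slice t1 none (some max_length) else t1
  -- for char in dangerous_chars: text = text.replace(char, '')
  dangerous_chars.foldl (fun s ch => PySem.Str.replace s (String.ofList [ch]) "") t2

-- ===== PORT B =====
-- while chars and chars[0].isspace(): del chars[0]
def peelFront : List Char → List Char
  | [] => []
  | c :: rest => if PySem.Chars.isspace c then peelFront rest else c :: rest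

-- while chars and chars[-1].isspace(): del chars[-1]
def peelBack (l : List Char) : List Char :=
  if h : l ≠ [] then
    if PySem.Chars.isspace (l.getLast h) then peelBack l.dropLast else l
  else l
termination_by l.length
decreasing_by simp [List.length_dropLast]; exact List.length_pos_iff.mpr h

def sanitize_text_input_alt (text : String) (max_length : Int) : String :=
  -- chars = list(text), then the two peeling loops
  let c1 := peelBack (peelFront text.toList)
  -- if len(chars) > max_length: chars = chars[:max_length]
  let c2 := if (c1.length : Int) > max_length then PySem.List.slice c1 none (some max_length) else c1
  -- bad = '<>:"|?*\x00'; for ch in chars: if ch not in bad: out.append(ch)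
  -- ('ch not in bad' for a single char is membership among bad's characters — exact)
  let bad : List Char := "<>:\"|?*\x00".toList
  String.ofList (c2.foldl (fun out ch => if !(bad.contains ch) then out ++ [ch] else out) [])

-- ===== PRECONDITION & SPEC =====
def Spec_sanitize_text_input (text : String) (max_length : Int) (out : String) : Prop := out = sanitize_text_input_alt text max_length
instance (text : String) (max_length : Int) (out : String) : Decidable (Spec_sanitize_text_input text max_length out) := by unfold Spec_sanitize_text_input; infer_instance

-- ===== CLAIM =====
def Claim_equal_sanitize_text_input : Prop := ∀ (text : String) (max_length : Int), Dom_sanitize_text_input text max_length → Spec_sanitize_text_input text max_length (sanitize_text_input text max_length)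

-- ===== LEMMAS AND PROOFS =====

lemma peelFront_eq_dropWhile (l : List Char) :
    peelFront l = l.dropWhile PySem.Chars.isspace := by
  induction l with
  | nil => rfl
  | cons c rest ih =>
    simp only [peelFront, List.dropWhile_cons]
    split <;> simp_all

lemma peelBack_eq_rstrip (l : List Char) :
    peelBack l = (l.reverse.dropWhile PySem.Chars.isspace).reverse := by
  induction hn : l.length using Nat.strong_induction_on generalizing l with
  | _ n ih =>
    rw [peelBack]
    by_cases h : l ≠ []
    · rw [dif_pos h]
      obtain ⟨init, last, hconcat⟩ := (List.eq_nil_or_concat l).resolve_left h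
      rw [List.concat_eq_append] at hconcat
      subst hconcat
      by_cases hs : PySem.Chars.isspace ((init ++ [last]).getLast h)
      · rw [if_pos hs]
        have hl : (init ++ [last]).getLast h = last := by simp
        rw [hl] at hs
        have hd : (init ++ [last]).dropLast = init := by simp
        rw [hd, ih init.length (by subst hn; simp) init rfl]
        simp [hs]
      · rw [if_neg hs]
        have hl : (init ++ [last]).getLast h = last := by simp
        rw [hl] at hs
        simp [hs]
    · rw [dif_neg h]
      simp at h; subst h; rfl

lemma peel_eq_strip (l : List Char) :
    peelBack (peelFront l) = PySem.Chars.strip l := by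
  rw [peelFront_eq_dropWhile, peelBack_eq_rstrip]
  rfl

-- replace.go with a single-character pattern and empty replacement is a filter
lemma replace_go_filter (c : Char) :
    ∀ (fuel : Nat) (l acc : List Char), l.length ≤ fuel →
      PySem.Chars.replace.go [c] [] fuel l acc = acc.reverse ++ l.filter (fun x => x != c) := by
  intro fuel
  induction fuel with
  | zero =>
    intro l acc h
    have : l = [] := List.length_eq_zero_iff.mp (Nat.le_zero.mp h)
    subst this
    simp [PySem.Chars.replace.go]
  | succ n ih =>
    intro l acc h
    cases l with
    | nil => simp [PySem.Chars.replace.go]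
    | cons x t =>
      simp only [PySem.Chars.replace.go]
      by_cases hx : x = c
      · subst hx
        have hpre : List.isPrefixOf [x] (x :: t) = true := by
          simp [List.isPrefixOf]
        rw [if_pos hpre]
        have hdrop : List.drop [x].length (x :: t) = t := by simp
        rw [hdrop]
        simp only [List.reverse_nil, List.nil_append]
        rw [ih t acc (by simpa using Nat.le_of_succ_le_succ h)]
        simp
      · have hpre : List.isPrefixOf [c] (x :: t) = false := by
          simp [List.isPrefixOf]
          exact fun hh => absurd hh.symm hx
        rw [if_neg (by simp [hpre])]
        rw [ih t (x :: acc) (by simpa using Nat.le_of_succ_le_succ h)]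
        simp [hx]

lemma replace_single_filter (l : List Char) (c : Char) :
    PySem.Chars.replace l [c] [] = l.filter (fun x => x != c) := by
  rw [PySem.Chars.replace]
  rw [if_neg (by simp)]
  exact replace_go_filter c l.length l [] le_rfl

lemma foldl_replace_filter (cs : List Char) (s : String) :
    (cs.foldl (fun s ch => PySem.Str.replace s (String.ofList [ch]) "") s).toList
      = s.toList.filter (fun x => !(cs.contains x)) := by
  induction cs generalizing s with
  | nil => simp
  | cons c rest ih =>
    simp only [List.foldl_cons]
    rw [ih]
    have h1 : (PySem.Str.replace s (String.ofList [c]) "").toList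
        = s.toList.filter (fun x => x != c) := by
      rw [PySem.Str.toList_replace]
      simp only [String.toList_ofList]
      have : ("" : String).toList = [] := rfl
      rw [this, replace_single_filter]
    rw [h1, List.filter_filter]
    apply List.filter_congr
    intro x _
    by_cases h1 : x = c <;> by_cases h2 : x ∈ rest <;>
      simp [h1, h2, bne]

theorem sanitize_toList_eq (text : String) (max_length : Int) :
    (sanitize_text_input text max_length).toList
      = (sanitize_text_input_alt text max_length).toList := by
  unfold sanitize_text_input sanitize_text_input_alt
  simp only []
  rw [foldl_replace_filter, String.toList_ofList]
  rw [PySem.List.foldl_append_if_eq_filter]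
  rw [List.nil_append]
  have hstrip : (PySem.Str.strip text).toList = peelBack (peelFront text.toList) := by
    rw [peel_eq_strip, PySem.Str.toList_strip]
  have hlen : PySem.Str.len (PySem.Str.strip text) = ((peelBack (peelFront text.toList)).length : Int) := by
    rw [PySem.Str.len_eq, hstrip]
  rw [hlen]
  have hbad : (fun ch => !(("<>:\"|?*\x00".toList : List Char).contains ch))
      = (fun x => !(dangerous_chars.contains x)) := by
    funext x
    have : ("<>:\"|?*\x00".toList : List Char) = dangerous_chars := by decide
    rw [this]
  by_cases hcut : ((peelBack (peelFront text.toList)).length : Int) > max_length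
  · rw [if_pos hcut, if_pos hcut]
    rw [PySem.Str.toList_slice, hstrip]
    simp only [PySem.Chars.slice_eq_listSlice, hbad]
  · rw [if_neg hcut, if_neg hcut, hstrip, hbad]

-- ===== VERDICT =====
theorem sanitize_text_input_spec : Claim_equal_sanitize_text_input := by
  intro text max_length _
  unfold Spec_sanitize_text_input
  exact String.toList_inj.mp (sanitize_toList_eq text max_length)
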